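-- pv_equiv track=rewrite | github.com/code4pt/dcid_django | parliament/utils.py | trim_3digits
-- ===== SOURCE A (Python) =====
-- def trim_3digits(n):
-- 	""" Shorts a number to 3 digits and an optional letter. Letters are added
-- 	to represent multiples of a thousand: K for 1000, M for 1000000, ...
-- 	Examples: 123456 => 123K; 7654321 => 7M """
-- 	number = str(n)
-- 	n_digits = len(number)
-- 	ten_times = 0
-- 	while(n_digits > 3):
-- 		n_digits -= 3
-- 		ten_times += 1
-- 	if(ten_times == 0):
-- 		return number
-- 	elif(ten_times == 1):
-- 		return number[:n_digits] + "K"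
-- 	elif(ten_times == 2):
-- 		return number[:n_digits] + "M"
-- 	else:
-- 		return number
-- ===== SOURCE B (Python) =====
-- def trim_3digits(n):
--     number = str(n)
--     d = len(number)
--     g = (d - 1) // 3
--     if g == 1:
--         return number[:d - 3] + "K"
--     if g == 2:
--         return number[:d - 6] + "M"
--     return number
-- ===== Notes on version B (the rewrite author's own statement) =====
-- stated objective: simpler
-- what changed: Replaces the subtraction while-loop with the closed form g = (len(str(n)) - 1) // 3 and slices directly with d-3 / d-6, dropping the loop and its two mutable counters.
import Mathlib
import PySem

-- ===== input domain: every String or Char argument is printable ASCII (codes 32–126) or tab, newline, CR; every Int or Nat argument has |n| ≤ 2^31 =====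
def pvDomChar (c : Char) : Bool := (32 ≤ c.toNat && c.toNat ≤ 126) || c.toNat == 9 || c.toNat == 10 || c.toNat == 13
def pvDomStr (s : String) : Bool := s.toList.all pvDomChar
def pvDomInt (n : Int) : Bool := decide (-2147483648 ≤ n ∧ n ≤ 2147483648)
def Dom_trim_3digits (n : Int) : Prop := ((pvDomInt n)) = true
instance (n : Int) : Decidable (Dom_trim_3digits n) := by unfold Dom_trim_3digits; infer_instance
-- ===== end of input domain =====

-- B replaces A's subtraction loop by the closed form g = (d - 1) // 3; simpler, no loop state.

-- ===== PORT A =====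
-- the 'while n_digits > 3: n_digits -= 3; ten_times += 1' loop, step for step
def trimLoop (nd tt : Int) : Int × Int :=
  if nd > 3 then trimLoop (nd - 3) (tt + 1) else (nd, tt)
termination_by nd.toNat
decreasing_by omega

def trim_3digits (n : Int) : String :=
  let number := PySem.Int.toChars n
  let p := trimLoop (PySem.List.len number) 0
  if p.2 == 0 then String.ofList number
  else if p.2 == 1 then String.ofList (PySem.List.slice number none (some p.1) ++ ['K'])
  else if p.2 == 2 then String.ofList (PySem.List.slice number none (some p.1) ++ ['M'])
  else String.ofList number

-- ===== PORT B =====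
def trim_3digits_alt (n : Int) : String :=
  let number := PySem.Int.toChars n
  let d := PySem.List.len number
  let g := PySem.Int.floordiv (d - 1) 3
  if g == 1 then String.ofList (PySem.List.slice number none (some (d - 3)) ++ ['K'])
  else if g == 2 then String.ofList (PySem.List.slice number none (some (d - 6)) ++ ['M'])
  else String.ofList number

-- ===== PRECONDITION & SPEC =====
def Spec_trim_3digits (n : Int) (out : String) : Prop := out = trim_3digits_alt n
instance (n : Int) (out : String) : Decidable (Spec_trim_3digits n out) := by unfold Spec_trim_3digits; infer_instance

-- ===== CLAIM (what is proved, stated in full; the proofs are below) =====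
def Claim_equal_trim_3digits : Prop := ∀ (n : Int), Dom_trim_3digits n → Spec_trim_3digits n (trim_3digits n)

-- ===== LEMMAS AND PROOFS =====
-- the loop computes exactly the closed form, for every starting n_digits ≥ 1
lemma trimLoop_closed (d t : Int) (hd : 1 ≤ d) :
    trimLoop d t = (d - 3 * PySem.Int.floordiv (d - 1) 3, t + PySem.Int.floordiv (d - 1) 3) := by
  rw [trimLoop]
  by_cases h : d > 3
  · simp only [if_pos h]
    rw [trimLoop_closed (d - 3) (t + 1) (by omega)]
    rw [PySem.Int.floordiv_eq_ediv_of_pos (by omega : (0:Int) < 3),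
        PySem.Int.floordiv_eq_ediv_of_pos (by omega : (0:Int) < 3)]
    simp only [Prod.mk.injEq]
    omega
  · simp only [if_neg h]
    rw [PySem.Int.floordiv_eq_ediv_of_pos (by omega : (0:Int) < 3)]
    have : (d - 1) / 3 = 0 := by omega
    rw [this]; simp
termination_by d.toNat
decreasing_by omega

-- ===== VERDICT (by name: the statement is the Claim_ definition above) =====
theorem trim_3digits_spec : Claim_equal_trim_3digits := by
  intro n _
  unfold Spec_trim_3digits trim_3digits trim_3digits_alt
  dsimp only
  generalize PySem.Int.toChars n = number
  rw [PySem.List.len_eq]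
  set d : Int := (number.length : Int) with hd
  have hd0 : 0 ≤ d := by positivity
  by_cases h1 : 1 ≤ d
  · rw [trimLoop_closed d 0 h1]
    set g := PySem.Int.floordiv (d - 1) 3 with hg
    have hg' : g = (d - 1) / 3 := by rw [hg, PySem.Int.floordiv_eq_ediv_of_pos (by omega : (0:Int) < 3)]
    simp only [zero_add]
    by_cases e0 : g = 0
    · simp [e0]
    · by_cases e1 : g = 1
      · simp [e1]
      · by_cases e2 : g = 2
        · simp [e2]
        · simp [e0, e1, e2]
  · -- d = 0 (str(n) is never empty, but the equality holds regardless)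
    have hdz : d = 0 := by omega
    rw [hdz, trimLoop]
    norm_num [PySem.Int.floordiv_eq_ediv_of_pos]
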